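-- pv_equiv track=rewrite | github.com/Fondamenti18/fondamenti-di-programmazione | students/1694493/homework01/program02.py | elisione
-- ===== SOURCE A (Python) =====
-- def elisione(numero):
--     new_numero = ""
--     for c in range(len(numero)):
--         if c != len(numero)-1:
--             if((numero[c]=="a" and numero[c+1] == "u") or (numero[c]=="o" and numero[c+1] == "u") ):
--                 False
--             else:
--                 new_numero += numero[c]
--         else:
--             new_numero += numero[c]
--
--     return new_numero
-- ===== SOURCE B (Python) =====
-- def elisione(numero):
--     parts = numero.split('u')
--     fixed = [p[:-1] if p.endswith(('a', 'o')) else p for p in parts[:-1]] + [parts[-1]]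
--     return 'u'.join(fixed)
-- ===== Notes on version B (the rewrite author's own statement) =====
-- stated objective: simpler
-- what changed: B replaces A's per-index scan with len-1 checks and character-by-character concatenation by a staged pipeline: split the string on 'u', strip a trailing 'a'/'o' from every segment except the last, and rejoin with 'u'.
import Mathlib
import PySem

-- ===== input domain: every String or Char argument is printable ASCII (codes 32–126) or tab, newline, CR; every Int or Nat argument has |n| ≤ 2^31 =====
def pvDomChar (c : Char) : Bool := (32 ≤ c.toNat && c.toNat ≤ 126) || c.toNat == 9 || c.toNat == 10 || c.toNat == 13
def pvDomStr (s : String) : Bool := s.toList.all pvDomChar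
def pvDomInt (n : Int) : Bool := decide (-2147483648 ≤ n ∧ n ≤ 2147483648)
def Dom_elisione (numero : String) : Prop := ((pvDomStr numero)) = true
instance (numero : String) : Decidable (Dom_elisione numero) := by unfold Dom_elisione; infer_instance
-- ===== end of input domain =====

-- B replaces A's per-index scan with a staged split-on-'u' / strip-trailing-'a'/'o' / rejoin pass (objective: simpler).

-- ===== PORT A =====
-- stepA is A's loop body, verbatim (the empty `False` branch is a no-op, so the
-- matched pair falls through with acc unchanged).
def stepA (l : List Char) (acc : List Char) (c : Nat) : List Char :=
  if c ≠ l.length - 1 then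
    if (l.getD c ' ' = 'a' ∧ l.getD (c+1) ' ' = 'u') ∨ (l.getD c ' ' = 'o' ∧ l.getD (c+1) ' ' = 'u') then
      acc
    else acc ++ [l.getD c ' ']
  else acc ++ [l.getD c ' ']

def elisione (numero : String) : String :=
  let l := numero.toList
  String.ofList ((List.range l.length).foldl (stepA l) [])

-- ===== PORT B =====
-- splitU is Python's numero.split('u') on the character list (single-char separator).
def splitU : List Char → List (List Char)
  | [] => [[]]
  | c :: r =>
    if c = 'u' then [] :: splitU r
    else
      match splitU r with
      | [] => [[c]]            -- unreachable: splitU never returns []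
      | p :: ps => (c :: p) :: ps

-- chopB is Source B's `p[:-1] if p.endswith(('a', 'o')) else p`.
def chopB (p : List Char) : List Char :=
  if p.getLast? = some 'a' ∨ p.getLast? = some 'o' then p.dropLast else p

-- mapInit is Source B's `[chop p for p in parts[:-1]] + [parts[-1]]`.
def mapInit : List (List Char) → List (List Char)
  | [] => []
  | [p] => [p]
  | p :: ps => chopB p :: mapInit ps

-- joinU is Python's 'u'.join(fixed).
def joinU : List (List Char) → List Char
  | [] => []
  | [p] => p
  | p :: ps => p ++ 'u' :: joinU ps

def elisione_alt (numero : String) : String :=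
  String.ofList (joinU (mapInit (splitU numero.toList)))

-- ===== PRECONDITION & SPEC =====
def Spec_elisione (numero : String) (out : String) : Prop := out = elisione_alt numero
instance (numero : String) (out : String) : Decidable (Spec_elisione numero out) := by unfold Spec_elisione; infer_instance

-- ===== CLAIM (what is proved, stated in full; the proofs are below) =====
def Claim_equal_elisione : Prop := ∀ (numero : String), Dom_elisione numero → Spec_elisione numero (elisione numero)

-- ===== LEMMAS AND PROOFS =====

-- bodyB: the single-pass characterisation used as the bridge between the two ports:
-- keep each character except one of 'a'/'o' immediately followed by 'u'; the last
-- character is always kept.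
def bodyB (l : List Char) : List Char :=
  (l.zip l.tail).filterMap (fun p =>
    if (p.1 = 'a' ∨ p.1 = 'o') ∧ p.2 = 'u' then none else some p.1) ++ l.drop (l.length - 1)

-- A's loop equals bodyB.
theorem loop_eq : ∀ (l : List Char) (acc : List Char),
    (List.range l.length).foldl (stepA l) acc = acc ++ bodyB l := by
  intro l
  induction l with
  | nil => intro acc; simp [bodyB]
  | cons c rest ih =>
    intro acc
    cases rest with
    | nil =>
      simp [bodyB, stepA]
    | cons d rest' =>
      have hlen : (c :: d :: rest').length = (d :: rest').length + 1 := rfl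
      rw [hlen, List.range_succ_eq_map, List.foldl_cons, List.foldl_map]
      have hstep : ∀ (acc' : List Char) (i : Nat), i ∈ List.range (d :: rest').length →
          stepA (c :: d :: rest') acc' (i + 1) = stepA (d :: rest') acc' i := by
        intro acc' i hi
        simp only [List.mem_range] at hi
        simp only [stepA, List.length_cons, List.getD_cons_succ]
        have h2 : (i + 1 ≠ rest'.length + 1 + 1 - 1) ↔ (i ≠ rest'.length + 1 - 1) := by omega
        rw [if_congr h2 rfl rfl]
      simp only [Nat.succ_eq_add_one]
      rw [PySem.List.foldl_congr_mem (List.range (d :: rest').length)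
        (fun x y => stepA (c :: d :: rest') x (y + 1)) (stepA (d :: rest')) _ hstep, ih]
      have hfirst : stepA (c :: d :: rest') acc 0 =
          acc ++ (if (c = 'a' ∨ c = 'o') ∧ d = 'u' then [] else [c]) := by
        simp only [stepA, List.length_cons, List.getD_cons_zero, List.getD_cons_succ]
        rw [if_pos (by omega : (0 : Nat) ≠ rest'.length + 1 + 1 - 1)]
        by_cases hcond : (c = 'a' ∨ c = 'o') ∧ d = 'u'
        · rw [if_pos hcond, if_pos (by tauto), List.append_nil]
        · rw [if_neg hcond, if_neg (by tauto)]
      rw [hfirst]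
      have hbody : bodyB (c :: d :: rest') =
          (if (c = 'a' ∨ c = 'o') ∧ d = 'u' then [] else [c]) ++ bodyB (d :: rest') := by
        simp only [bodyB, List.tail_cons, List.zip_cons_cons, List.filterMap_cons,
          List.length_cons]
        by_cases hcond : (c = 'a' ∨ c = 'o') ∧ d = 'u'
        · simp [hcond]
        · simp [hcond]
      rw [hbody, List.append_assoc]

theorem bodyB_cons₂ (c d : Char) (r : List Char) :
    bodyB (c :: d :: r) =
      (if (c = 'a' ∨ c = 'o') ∧ d = 'u' then [] else [c]) ++ bodyB (d :: r) := by
  simp only [bodyB, List.tail_cons, List.zip_cons_cons, List.filterMap_cons, List.length_cons]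
  by_cases hcond : (c = 'a' ∨ c = 'o') ∧ d = 'u'
  · simp [hcond]
  · simp [hcond]

theorem splitU_ne_nil : ∀ (l : List Char), splitU l ≠ [] := by
  intro l
  cases l with
  | nil => simp [splitU]
  | cons c r =>
    simp only [splitU]
    split
    · simp
    · cases h : splitU r <;> simp

theorem mapInit_ne_nil : ∀ (S : List (List Char)), S ≠ [] → mapInit S ≠ [] := by
  intro S hS
  match S with
  | [p] => simp [mapInit]
  | p :: q :: ps => simp [mapInit]

theorem mapInit_cons (x : List Char) (S : List (List Char)) (hS : S ≠ []) :
    mapInit (x :: S) = chopB x :: mapInit S := by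
  match S with
  | q :: ps => rfl

theorem joinU_cons (x : List Char) (S : List (List Char)) (hS : S ≠ []) :
    joinU (x :: S) = x ++ 'u' :: joinU S := by
  match S with
  | q :: ps => rfl

theorem chopB_cons (c : Char) (p : List Char) (hp : p ≠ []) :
    chopB (c :: p) = c :: chopB p := by
  obtain ⟨q, qs, rfl⟩ := List.exists_cons_of_ne_nil hp
  unfold chopB
  rw [List.getLast?_cons_cons]
  split <;> simp

theorem chopB_single (c : Char) :
    chopB [c] = if c = 'a' ∨ c = 'o' then [] else [c] := by
  unfold chopB
  simp only [List.getLast?_singleton, List.dropLast_singleton, Option.some_inj]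

-- B's staged split/chop/join equals bodyB.
theorem staged_eq : ∀ (l : List Char), joinU (mapInit (splitU l)) = bodyB l := by
  intro l
  induction l with
  | nil => simp [splitU, mapInit, joinU, bodyB]
  | cons c tl ih =>
    cases tl with
    | nil =>
      by_cases hc : c = 'u' <;>
        simp [splitU, mapInit, joinU, bodyB, chopB, hc]
    | cons d r =>
      rw [bodyB_cons₂]
      by_cases hc : c = 'u'
      · -- c = 'u': a new empty segment is opened; bodyB's delete-condition is false
        have hcond : ¬ ((c = 'a' ∨ c = 'o') ∧ d = 'u') := by
          subst hc; rintro ⟨h1 | h1, _⟩ <;> simp at h1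
        rw [if_neg hcond]
        have h1 : splitU (c :: d :: r) = [] :: splitU (d :: r) := by
          simp only [splitU, if_pos hc]
        rw [h1, mapInit_cons _ _ (splitU_ne_nil _),
          joinU_cons _ _ (mapInit_ne_nil _ (splitU_ne_nil _)), ih]
        simp [chopB, hc]
      · by_cases hd : d = 'u'
        · -- d = 'u': the current segment is [c]; its trailing 'a'/'o' (if any) is chopped
          have hS : splitU (d :: r) = [] :: splitU r := by
            simp only [splitU, if_pos hd]
          have h1 : splitU (c :: d :: r) = [c] :: splitU r := by
            simp only [splitU, if_neg hc, if_pos hd]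
          rw [h1, mapInit_cons _ _ (splitU_ne_nil r),
            joinU_cons _ _ (mapInit_ne_nil _ (splitU_ne_nil r))]
          rw [hS, mapInit_cons _ _ (splitU_ne_nil r),
            joinU_cons _ _ (mapInit_ne_nil _ (splitU_ne_nil r))] at ih
          rw [← ih, chopB_single]
          have : chopB ([] : List Char) = [] := by simp [chopB]
          rw [this]
          by_cases hco : c = 'a' ∨ c = 'o'
          · rw [if_pos hco, if_pos ⟨hco, hd⟩]; rfl
          · rw [if_neg hco, if_neg (fun h => hco h.1)]; rfl
        · -- d ≠ 'u': c joins d's segment, whose last character is unchanged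
          have hcond : ¬ ((c = 'a' ∨ c = 'o') ∧ d = 'u') := fun h => hd h.2
          rw [if_neg hcond]
          obtain ⟨p', ps', hr⟩ : ∃ p' ps', splitU r = p' :: ps' := by
            cases h : splitU r with
            | nil => exact absurd h (splitU_ne_nil _)
            | cons p' ps' => exact ⟨p', ps', rfl⟩
          have hS : splitU (d :: r) = (d :: p') :: ps' := by
            simp only [splitU, if_neg hd, hr]
          have h1 : splitU (c :: d :: r) = (c :: d :: p') :: ps' := by
            simp only [splitU, if_neg hc, if_neg hd, hr]
          rw [h1, ← ih, hS]
          cases hps' : ps' with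
          | nil =>
            simp only [mapInit, joinU]; rfl
          | cons q qs =>
            have hqne : (q :: qs : List (List Char)) ≠ [] := by simp
            rw [mapInit_cons _ _ hqne, mapInit_cons _ _ hqne,
              joinU_cons _ _ (mapInit_ne_nil _ hqne), joinU_cons _ _ (mapInit_ne_nil _ hqne),
              chopB_cons c (d :: p') (by simp)]
            rfl

-- ===== VERDICT (by name: the statement is the Claim_ definition above) =====
theorem elisione_spec : Claim_equal_elisione := by
  intro numero _
  unfold Spec_elisione elisione elisione_alt
  exact congrArg String.ofList
    (((loop_eq numero.toList []).trans (List.nil_append _)).trans (staged_eq numero.toList).symm)
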